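-- pv_equiv track=rewrite | github.com/jarret/lightning-station | panel/widget.py | pad_align_cols
-- ===== SOURCE A (Python) =====
-- def pad_align_cols(rows):
--     new_rows = []
--     for i in range(len(rows[0])):
--         new_rows.append([])
--         max_width = 0
--         for j in range(len(rows)):
--             max_width = max(max_width, len(rows[j][i]))
--         for j in range(len(rows)):
--             fmt = "%%%ds" % max_width
--             new_rows[i].append(fmt % rows[j][i])
--     return [list(i) for i in zip(*new_rows)]
-- ===== SOURCE B (Python) =====
-- def pad_align_cols(rows):
--     # Divide and conquer on the column range: pad a single column to its own max
--     # width in the base case, split wider ranges in half, recurse, and stitch the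
--     # two padded halves of every row back together.
--     def solve(lo, hi):
--         if hi <= lo:
--             return [[] for _ in rows]
--         if hi == lo + 1:
--             w = max(len(row[lo]) for row in rows)
--             return [[row[lo].rjust(w)] for row in rows]
--         mid = (lo + hi) // 2
--         left, right = solve(lo, mid), solve(mid, hi)
--         return [l + r for l, r in zip(left, right)]
--     return solve(0, len(rows[0]))
-- ===== Notes on version B (the rewrite author's own statement) =====
-- stated objective: alternative
-- what changed: B pads by divide and conquer on the column range (base case pads one column to its max width, the recursion stitches the two padded halves of every row together), replacing A's staged column-major loops that build padded columns and then transpose with zip.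
-- intended difference: On non-empty inputs whose first row is empty (zero columns), A returns [] because zip of no iterables collapses the transpose, while B returns one empty list per row, which preserves the row count as a padding function should. — e.g. on pad_align_cols([[], []]): A returns [], B returns [[], []]
-- outside the precondition, e.g. on pad_align_cols([]): A raises IndexError, B raises IndexError; on pad_align_cols([['a', 'bb'], ['c']]): A raises IndexError, B raises IndexError
import Mathlib
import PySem

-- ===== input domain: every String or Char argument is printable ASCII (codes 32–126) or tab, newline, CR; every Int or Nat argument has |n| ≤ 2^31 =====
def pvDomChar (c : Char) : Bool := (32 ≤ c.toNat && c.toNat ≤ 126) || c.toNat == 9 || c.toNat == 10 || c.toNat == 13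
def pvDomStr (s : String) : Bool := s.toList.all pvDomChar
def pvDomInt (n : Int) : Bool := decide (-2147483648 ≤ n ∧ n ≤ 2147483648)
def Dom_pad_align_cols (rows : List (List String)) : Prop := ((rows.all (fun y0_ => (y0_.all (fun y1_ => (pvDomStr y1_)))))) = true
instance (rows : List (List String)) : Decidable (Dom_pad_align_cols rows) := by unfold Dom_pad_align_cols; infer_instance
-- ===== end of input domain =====

-- B replaces A's staged column-major loops + zip transpose by a divide-and-conquer recursion on
-- the column range (pad a single column in the base case, stitch the two padded halves of each
-- row together); no transpose. Neither version mutates its argument.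

-- right-justification with spaces: "%Nds" % s  =  s.rjust(N)  (shared formatting helper)
def padL (w : Nat) (s : String) : String :=
  String.ofList (List.replicate (w - s.toList.length) ' ' ++ s.toList)

-- ===== PORT A =====
-- zip(*cols) followed by list(): rows of the k-th elements, up to the shortest column
def pyZipT (ls : List (List String)) : List (List String) :=
  match ls with
  | [] => []
  | c :: cs =>
    let m := cs.foldl (fun a l => min a l.length) c.length
    (List.range m).map (fun k => (c :: cs).map (fun col => col.getD k ""))

def pad_align_cols (rows : List (List String)) : List (List String) :=
  -- for i in range(len(rows[0])): build column i (max width, then formatted cells)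
  let new_rows := (List.range (rows.headD []).length).map (fun i =>
    let max_width := rows.foldl (fun a r => max a (r.getD i "").toList.length) 0
    rows.map (fun r => padL max_width (r.getD i "")))
  pyZipT new_rows

-- ===== PORT B =====
-- solve(lo, hi): pad columns lo..hi-1 of every row (divide and conquer on the column range)
def solveDC (rows : List (List String)) (lo hi : Nat) : List (List String) :=
  if hi ≤ lo then rows.map (fun _ => ([] : List String))
  else if hi = lo + 1 then
    let w := (rows.map (fun r => (r.getD lo "").toList.length)).foldl max 0
    rows.map (fun r => [padL w (r.getD lo "")])
  else
    let mid := (lo + hi) / 2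
    ((solveDC rows lo mid).zip (solveDC rows mid hi)).map (fun p => p.1 ++ p.2)
termination_by hi - lo
decreasing_by all_goals omega

def pad_align_cols_alt (rows : List (List String)) : List (List String) :=
  solveDC rows 0 (rows.headD []).length

-- ===== PRECONDITION & SPEC =====
-- A raises IndexError on an empty input (indexing the first row) and when some row is shorter
-- than the first row; exactly those inputs are excluded.
def Pre_pad_align_cols (rows : List (List String)) : Prop :=
  rows ≠ [] ∧ ∀ r ∈ rows, (rows.headD []).length ≤ r.length
instance (rows : List (List String)) : Decidable (Pre_pad_align_cols rows) := by
  unfold Pre_pad_align_cols; infer_instance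
def pvWitness_pad_align_cols : List (List String) := [["a", "bb"], ["ccc", "d"]]

-- On non-empty inputs whose first row is empty (zero columns), A returns [] because zip of no
-- iterables collapses the transpose, while B returns one empty list per row, which preserves the
-- row count as a padding function should.
def D_pad_align_cols (rows : List (List String)) : Prop :=
  rows ≠ [] ∧ rows.headD [] = []
instance (rows : List (List String)) : Decidable (D_pad_align_cols rows) := by
  unfold D_pad_align_cols; infer_instance

def Spec_pad_align_cols (rows : List (List String)) (out : List (List String)) : Prop :=
  ¬ D_pad_align_cols rows → out = pad_align_cols_alt rows
instance (rows : List (List String)) (out : List (List String)) : Decidable (Spec_pad_align_cols rows out) := by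
  unfold Spec_pad_align_cols; infer_instance

def pvDiffWitness_pad_align_cols : List (List String) := [[], []]
def pvDiffWitnessOut_pad_align_cols : (List (List String)) × (List (List String)) :=
  ([], [[], []])

-- ===== CLAIM (what is proved, stated in full; the proofs are below) =====
def Claim_unchanged_pad_align_cols : Prop := ∀ (rows : List (List String)), Dom_pad_align_cols rows → Pre_pad_align_cols rows → Spec_pad_align_cols rows (pad_align_cols rows)
def Claim_changed_pad_align_cols : Prop := Dom_pad_align_cols (pvDiffWitness_pad_align_cols) ∧ Pre_pad_align_cols (pvDiffWitness_pad_align_cols) ∧ D_pad_align_cols (pvDiffWitness_pad_align_cols) ∧ pad_align_cols (pvDiffWitness_pad_align_cols) = pvDiffWitnessOut_pad_align_cols.1 ∧ pad_align_cols_alt (pvDiffWitness_pad_align_cols) = pvDiffWitnessOut_pad_align_cols.2 ∧ pvDiffWitnessOut_pad_align_cols.1 ≠ pvDiffWitnessOut_pad_align_cols.2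
def Claim_exact_pad_align_cols : Prop := ∀ (rows : List (List String)), Dom_pad_align_cols rows → Pre_pad_align_cols rows → D_pad_align_cols rows → pad_align_cols rows ≠ pad_align_cols_alt rows

-- ===== LEMMAS AND PROOFS =====

-- Proof-only intermediate form: the widths-table/row-major characterisation of the result.
def padTab (rows : List (List String)) : List (List String) :=
  let ncols := (rows.headD []).length
  let widths := (List.range ncols).map (fun i =>
    (rows.map (fun r => (r.getD i "").toList.length)).foldl max 0)
  rows.map (fun r => (List.range ncols).map (fun i => padL (widths.getD i 0) (r.getD i "")))

-- per-column width: max cell length down column i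
def colW (rows : List (List String)) (i : Nat) : Nat :=
  (rows.map (fun r => (r.getD i "").toList.length)).foldl max 0

-- the divide-and-conquer solver padded against the row-major characterisation, by strong
-- induction on the width of the column range
theorem solveDC_eq (rows : List (List String)) (n : Nat) : ∀ lo hi : Nat, hi - lo = n →
    solveDC rows lo hi
      = rows.map (fun r => (List.range' lo (hi - lo)).map (fun i => padL (colW rows i) (r.getD i ""))) := by
  induction n using Nat.strong_induction_on with
  | _ n ih =>
    intro lo hi h
    rw [solveDC]
    by_cases h0 : hi ≤ lo
    · simp [h0, Nat.sub_eq_zero_of_le h0]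
    · rw [if_neg h0]
      by_cases h1 : hi = lo + 1
      · rw [if_pos h1]
        simp [h1, colW]
      · rw [if_neg h1]
        show List.map (fun p => p.1 ++ p.2)
            ((solveDC rows lo ((lo + hi) / 2)).zip (solveDC rows ((lo + hi) / 2) hi)) = _
        rw [ih (( (lo + hi) / 2) - lo) (by omega) lo ((lo + hi) / 2) rfl,
            ih (hi - (lo + hi) / 2) (by omega) ((lo + hi) / 2) hi rfl]
        rw [List.zip_map', List.map_map]
        apply List.map_congr_left
        intro r _
        simp only [Function.comp_def]
        rw [← List.map_append]
        congr 1
        obtain ⟨k, hk⟩ : ∃ k, (lo + hi) / 2 = lo + k := ⟨(lo + hi) / 2 - lo, by omega⟩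
        rw [hk]
        simp only [Nat.add_sub_cancel_left]
        rw [List.range'_append_1]
        congr 1
        omega

-- B equals the widths-table characterisation
theorem alt_eq_tab (rows : List (List String)) : pad_align_cols_alt rows = padTab rows := by
  unfold pad_align_cols_alt padTab
  rw [solveDC_eq rows _ 0 (rows.headD []).length rfl]
  apply List.map_congr_left
  intro r _
  simp only [Nat.sub_zero, ← List.range_eq_range']
  apply List.map_congr_left
  intro i hi
  simp only [List.mem_range] at hi
  congr 1
  rw [List.getD_eq_getElem _ _ (by simpa using hi)]
  simp [colW]

theorem foldl_min_const (cs : List (List String)) (m : Nat)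
    (h : ∀ l ∈ cs, l.length = m) : cs.foldl (fun a l => min a l.length) m = m := by
  induction cs with
  | nil => rfl
  | cons c cs ih =>
    have hc : c.length = m := h c (by simp)
    simp only [List.foldl_cons, hc, min_self]
    exact ih (fun l hl => h l (by simp [hl]))

theorem pyZipT_uniform (ls : List (List String)) (m : Nat) (hne : ls ≠ [])
    (h : ∀ l ∈ ls, l.length = m) :
    pyZipT ls = (List.range m).map (fun k => ls.map (fun col => col.getD k "")) := by
  cases ls with
  | nil => exact absurd rfl hne
  | cons c cs =>
    have hc : c.length = m := h c (by simp)
    have hmin : cs.foldl (fun a l => min a l.length) c.length = m := by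
      rw [hc]; exact foldl_min_const cs m (fun l hl => h l (by simp [hl]))
    simp only [pyZipT, hmin]

theorem a_eq_tab (rows : List (List String)) (hpre : Pre_pad_align_cols rows)
    (hD : ¬ D_pad_align_cols rows) : pad_align_cols rows = padTab rows := by
  by_cases hn : (rows.headD []).length = 0
  · cases rows with
    | nil => exact absurd rfl hpre.1
    | cons r0 rs =>
      exact absurd ⟨by simp, List.length_eq_zero_iff.mp (by simpa using hn)⟩ hD
  · unfold pad_align_cols padTab
    rw [pyZipT_uniform _ rows.length
        (by simp only [ne_eq, List.map_eq_nil_iff, List.range_eq_nil]; exact hn)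
        (by intro l hl; simp only [List.mem_map] at hl
            obtain ⟨i, _, rfl⟩ := hl; simp)]
    apply List.ext_getElem (by simp)
    intro k hk1 hk2
    simp only [List.length_map, List.length_range] at hk1
    simp only [List.getElem_map, List.getElem_range, List.map_map]
    apply List.ext_getElem (by simp)
    intro i hi1 hi2
    simp only [List.length_map, List.length_range] at hi1
    simp only [List.getElem_map, List.getElem_range, Function.comp]
    have hwidth : (((List.range (rows.headD []).length).map (fun i =>
        (rows.map (fun r => (r.getD i "").toList.length)).foldl max 0)).getD i 0)
        = rows.foldl (fun a r => max a (r.getD i "").toList.length) 0 := by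
      rw [List.getD_eq_getElem _ _ (by simpa using hi1)]
      simp [List.foldl_map]
    rw [hwidth]
    rw [List.getD_eq_getElem _ _ (by simpa using hk1)]
    simp

-- ===== VERDICT (by name: the statement is the Claim_ definition above) =====
theorem pad_align_cols_spec : Claim_unchanged_pad_align_cols := by
  intro rows _ hpre hD
  rw [a_eq_tab rows hpre hD, alt_eq_tab rows]

theorem pad_align_cols_changed : Claim_changed_pad_align_cols := by
  unfold Claim_changed_pad_align_cols
  refine ⟨by decide, by decide, by decide, by decide, ?_, by decide⟩
  rw [pad_align_cols_alt, solveDC]; decide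

theorem pad_align_cols_tight : Claim_exact_pad_align_cols := by
  intro rows _ _ hD
  obtain ⟨hne, hhd⟩ := hD
  cases rows with
  | nil => exact absurd rfl hne
  | cons r0 rs =>
    have hr0 : r0 = [] := by simpa using hhd
    simp [pad_align_cols, pad_align_cols_alt, hr0, pyZipT, solveDC]
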